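-- pv_equiv track=rewrite | github.com/pypi-data/pypi-mirror-402 | packages/genro-bag/genro_bag-0.7.5.tar.gz/genro_bag-0.7.5/tests/test_resolver_permutations.py | pattern_set_item_hits_resolver
-- ===== SOURCE A (Python) =====
-- def pattern_set_item_hits_resolver(pattern: str) -> bool:
--     """Check if set_item will hit a resolver node (Issue #5).
--
--     set_item uses write_mode=True which traverses statically, creating new Bags
--     when needed. Issue #5 (BagNodeException) triggers when the FINAL node
--     in the path has a resolver.
--
--     The final node has a resolver when:
--     - Pattern ends with S or A
--     - AND all preceding levels are reachable statically (all P before the final)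
--
--     Examples:
--     - "S" → final node is 'a' with resolver → ERROR
--     - "A" → final node is 'a' with resolver → ERROR
--     - "P.S" → 'a' is Bag, final 'b' has resolver → ERROR
--     - "P.A" → 'a' is Bag, final 'b' has resolver → ERROR
--     - "S.P" → 'a' has resolver, _htraverse creates new Bag → NO ERROR (writes to new structure)
--     - "S.S" → 'a' has resolver, _htraverse creates new Bag → NO ERROR
--     - "P.S.A" → 'a' is Bag, 'b' has resolver, _htraverse creates new Bag → NO ERROR
--     """
--     levels = pattern.split(".")
--     last = levels[-1]
--
--     # Final level must be a resolver
--     if last not in ("S", "A"):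
--         return False
--
--     # All preceding levels must be P (reachable statically)
--     # If any preceding level is S or A, _htraverse creates new Bags
--     for level in levels[:-1]:
--         if level in ("S", "A"):
--             return False
--
--     return True
-- ===== SOURCE B (Python) =====
-- def pattern_set_item_hits_resolver(pattern: str) -> bool:
--     # Character-level single pass: track the current level's text and whether
--     # any completed (preceding) level was a resolver; no splitting needed.
--     ok = True
--     token = ""
--     for ch in pattern:
--         if ch == ".":
--             if token in ("S", "A"):
--                 ok = False
--             token = ""
--         else:
--             token += ch
--     return ok and token in ("S", "A")
-- ===== Notes on version B (the rewrite author's own statement) =====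
-- stated objective: alternative
-- what changed: Replaces A's dot-splitting of the pattern, the last-element check plus a scan of the preceding slice with a single character-level fold over the raw string that never splits: it accumulates the current level's text and a flag recording whether any completed level was a resolver.
import Mathlib
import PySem

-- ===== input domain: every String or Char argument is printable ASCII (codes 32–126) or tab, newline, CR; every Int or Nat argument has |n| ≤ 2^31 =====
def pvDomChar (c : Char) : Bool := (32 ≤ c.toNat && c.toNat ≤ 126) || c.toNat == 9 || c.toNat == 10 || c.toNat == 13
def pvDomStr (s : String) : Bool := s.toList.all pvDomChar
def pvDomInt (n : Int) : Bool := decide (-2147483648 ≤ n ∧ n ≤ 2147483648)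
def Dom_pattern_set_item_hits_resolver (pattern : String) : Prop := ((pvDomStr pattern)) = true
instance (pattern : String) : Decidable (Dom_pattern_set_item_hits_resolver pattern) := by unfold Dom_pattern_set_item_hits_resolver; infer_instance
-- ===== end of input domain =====

-- B replaces A's split-then-scan (split the pattern into levels, check the last element, scan the preceding
-- slice) with a single character-level pass that never splits: it folds over the raw
-- characters, accumulating the current level's text and a flag recording whether any
-- completed level was a resolver (objective: alternative decomposition, same cost).


-- ===== PORT A =====
def pattern_set_item_hits_resolver (pattern : String) : Bool :=
  let levels := (PySem.Str.split? pattern ".").getD []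
  match PySem.List.pyGet? levels (-1) with
  | none => false  -- unreachable: str.split always returns a nonempty list
  | some last =>
    if !(last == "S" || last == "A") then false
    else
      (PySem.List.slice levels none (some (-1))).foldl
        (fun ok level => if level == "S" || level == "A" then false else ok) true

-- ===== PORT B =====
-- 'for ch in pattern' over pattern.toList; the state is (ok, token), token kept as List Char
def pattern_set_item_hits_resolver_alt (pattern : String) : Bool :=
  let st := pattern.toList.foldl
    (fun (st : Bool × List Char) ch =>
      if ch = '.' then
        (if st.2 == ['S'] || st.2 == ['A'] then false else st.1, [])
      else
        (st.1, st.2 ++ [ch]))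
    (true, [])
  st.1 && (st.2 == ['S'] || st.2 == ['A'])

-- ===== PRECONDITION & SPEC =====
def Spec_pattern_set_item_hits_resolver (pattern : String) (out : Bool) : Prop := out = pattern_set_item_hits_resolver_alt pattern
instance (pattern : String) (out : Bool) : Decidable (Spec_pattern_set_item_hits_resolver pattern out) := by unfold Spec_pattern_set_item_hits_resolver; infer_instance

-- ===== CLAIM (what is proved, stated in full; the proofs are below) =====
def Claim_equal_pattern_set_item_hits_resolver : Prop := ∀ (pattern : String), Dom_pattern_set_item_hits_resolver pattern → Spec_pattern_set_item_hits_resolver pattern (pattern_set_item_hits_resolver pattern)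

-- ===== LEMMAS AND PROOFS =====

-- a resolver level
def isSA (t : List Char) : Bool := t == ['S'] || t == ['A']

-- structural version of splitting on '.'
def splitRec (pre : List Char) : List Char → List (List Char)
  | [] => [pre]
  | c :: rest => if c = '.' then pre :: splitRec [] rest else splitRec (pre ++ [c]) rest

theorem splitRec_ne_nil (pre : List Char) (l : List Char) : splitRec pre l ≠ [] := by
  induction l generalizing pre with
  | nil => simp [splitRec]
  | cons c rest ih =>
    by_cases h : c = '.' <;> simp [splitRec, h, ih]

theorem splitOn_go_eq (fuel : Nat) : ∀ (l cur : List Char) (acc : List (List Char)),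
    l.length < fuel →
    PySem.Chars.splitOn.go ['.'] fuel l cur acc = acc.reverse ++ splitRec cur.reverse l := by
  induction fuel with
  | zero => intro l cur acc h; omega
  | succ fuel ih =>
    intro l cur acc h
    cases l with
    | nil => simp [PySem.Chars.splitOn.go, splitRec]
    | cons c rest =>
      by_cases hc : c = '.'
      · subst hc
        have hpre : List.isPrefixOf ['.'] ('.' :: rest) = true := by simp [List.isPrefixOf]
        rw [PySem.Chars.splitOn.go, if_pos hpre]
        simp only [List.length_singleton, List.drop_succ_cons, List.drop_zero]
        rw [ih rest [] (cur.reverse :: acc) (by simpa using Nat.lt_of_succ_lt_succ h)]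
        simp [splitRec]
      · have hpre : List.isPrefixOf ['.'] (c :: rest) = false := by
          simp [List.isPrefixOf]
          exact fun hh => hc hh.symm
        rw [PySem.Chars.splitOn.go, if_neg (by simp [hpre])]
        rw [ih rest (c :: cur) acc (by simpa using Nat.lt_of_succ_lt_succ h)]
        simp [splitRec, hc]

theorem splitOn_eq (l : List Char) : PySem.Chars.splitOn l ['.'] = splitRec [] l := by
  have := splitOn_go_eq (l.length + 1) l [] [] (by omega)
  simpa [PySem.Chars.splitOn] using this

-- forward-recursive check: exactly one resolver level, at the last position
def walk : List (List Char) → Bool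
  | [] => false
  | [t] => isSA t
  | t :: rest => !isSA t && walk rest

theorem walk_cons (t : List Char) (rest : List (List Char)) (h : rest ≠ []) :
    walk (t :: rest) = (!isSA t && walk rest) := by
  cases rest with
  | nil => exact absurd rfl h
  | cons u rs => rfl

-- characterization of walk via last / preceding
theorem walk_eq (l : List (List Char)) (h : l ≠ []) :
    walk l = (isSA (l.getLast h) && !l.dropLast.any isSA) := by
  induction l with
  | nil => exact absurd rfl h
  | cons t rest ih =>
    cases rest with
    | nil => simp [walk, isSA]
    | cons u rs =>
      rw [walk_cons t (u :: rs) (by simp)]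
      rw [ih (by simp)]
      simp only [List.dropLast_cons₂, List.any_cons]
      cases isSA t <;> simp

-- B's fold, fused with splitRec
def stepB (st : Bool × List Char) (ch : Char) : Bool × List Char :=
  if ch = '.' then
    (if st.2 == ['S'] || st.2 == ['A'] then false else st.1, [])
  else
    (st.1, st.2 ++ [ch])

theorem fold_eq (L : List Char) : ∀ (ok : Bool) (pre : List Char),
    ((L.foldl stepB (ok, pre)).1 && isSA (L.foldl stepB (ok, pre)).2)
    = (ok && walk (splitRec pre L)) := by
  induction L with
  | nil => intro ok pre; simp [splitRec, walk, isSA]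
  | cons c rest ih =>
    intro ok pre
    by_cases hc : c = '.'
    · subst hc
      rw [show ('.' :: rest).foldl stepB (ok, pre)
            = rest.foldl stepB (if pre == ['S'] || pre == ['A'] then false else ok, []) from by
          simp [stepB]]
      rw [ih]
      rw [show splitRec pre ('.' :: rest) = pre :: splitRec [] rest from by simp [splitRec]]
      rw [walk_cons pre _ (splitRec_ne_nil [] rest)]
      cases hp : isSA pre <;> simp only [isSA] at hp <;> simp [hp]
    · rw [show (c :: rest).foldl stepB (ok, pre) = rest.foldl stepB (ok, pre ++ [c]) from by
          simp [stepB, hc]]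
      rw [ih]
      rw [show splitRec pre (c :: rest) = splitRec (pre ++ [c]) rest from by simp [splitRec, hc]]

theorem ofList_beq (t u : List Char) : (String.ofList t == String.ofList u) = (t == u) := by
  by_cases h : t = u
  · subst h; simp
  · have h2 : String.ofList t ≠ String.ofList u := fun hh =>
      h (by simpa using congrArg String.toList hh)
    simp [h, h2]

-- A's body on the mapped level list equals walk
theorem A_body_eq_walk (l : List (List Char)) (h : l ≠ []) :
    (match (l.map String.ofList).getLast? with
     | none => false
     | some last =>
       if !(last == "S" || last == "A") then false
       else
         ((l.map String.ofList).dropLast.foldl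
           (fun ok level => if level == "S" || level == "A" then false else ok) true))
    = walk l := by
  have hmapne : l.map String.ofList ≠ [] := by simpa using h
  rw [List.getLast?_eq_some_getLast hmapne]
  rw [List.getLast_map (f := String.ofList)]
  dsimp only
  rw [PySem.List.foldl_if_false_eq]
  rw [walk_eq l h]
  have hS : ("S" : String) = String.ofList ['S'] := rfl
  have hA : ("A" : String) = String.ofList ['A'] := rfl
  rw [hS, hA, ofList_beq, ofList_beq]
  rw [← List.map_dropLast, List.any_map]
  have : ((fun level => level == "S" || level == "A") ∘ String.ofList) = isSA := by
    funext t
    simp only [Function.comp, hS, hA, ofList_beq, ofList_beq, isSA]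
  rw [this]
  cases hsa : isSA (l.getLast h) <;> simp [isSA] at hsa ⊢ <;> simp_all

-- ===== VERDICT (by name: the statement is the Claim_ definition above) =====
theorem pattern_set_item_hits_resolver_spec : Claim_equal_pattern_set_item_hits_resolver := by
  intro pattern _
  unfold Spec_pattern_set_item_hits_resolver pattern_set_item_hits_resolver pattern_set_item_hits_resolver_alt
  dsimp only
  have hsplit : (PySem.Str.split? pattern ".").getD []
      = (splitRec [] pattern.toList).map String.ofList := by
    simp [PySem.Str.split?, PySem.Chars.split?, splitOn_eq]
  rw [hsplit, PySem.List.pyGet?_neg_one, PySem.List.slice_to_neg_one]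
  rw [show (fun (st : Bool × List Char) ch =>
        if ch = '.' then
          (if st.2 == ['S'] || st.2 == ['A'] then false else st.1, ([] : List Char))
        else
          (st.1, st.2 ++ [ch])) = stepB from rfl]
  have hB := fold_eq pattern.toList true []
  simp only [Bool.true_and] at hB
  rw [show ((pattern.toList.foldl stepB (true, [])).1
        && ((pattern.toList.foldl stepB (true, [])).2 == ['S']
            || (pattern.toList.foldl stepB (true, [])).2 == ['A']))
      = walk (splitRec [] pattern.toList) from hB]
  exact A_body_eq_walk (splitRec [] pattern.toList) (splitRec_ne_nil [] pattern.toList)
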